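-- pv_equiv track=rewrite | github.com/DavMateo/CampusLands-Python | Matrices/Ejercicios/sweetCO-matrices.py | calcularProductoMaxIngresoSemana
-- ===== SOURCE A (Python) =====
-- def calcularProductoMaxIngresoSemana(matrizVentas, matrizPrecios):
--     filas = len(matrizVentas)
--     listaTotalVentas = [0] * filas
--
--     for f in range(filas):
--         listaTotalVentas[f] = sum(matrizVentas[f]) * matrizPrecios[f]
--
--     maxVentas = max(listaTotalVentas)
--     productoMaxVentas = listaTotalVentas.index(maxVentas) + 1
--
--     return productoMaxVentas
-- ===== SOURCE B (Python) =====
-- def calcularProductoMaxIngresoSemana(matrizVentas, matrizPrecios):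
--     best = None
--     mejorProducto = 0
--     for f, fila in enumerate(matrizVentas):
--         ingreso = sum(fila) * matrizPrecios[f]
--         if best is None or ingreso > best:
--             best = ingreso
--             mejorProducto = f + 1
--     if best is None:
--         raise ValueError("matrizVentas vacia")
--     return mejorProducto
-- ===== Notes on version B (the rewrite author's own statement) =====
-- stated objective: simpler
-- what changed: Single fused pass maintaining a running best revenue and 1-based best index (strict '>' keeps the first maximum), instead of building an intermediate revenue list and scanning it twice with max() and .index().
import Mathlib
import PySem

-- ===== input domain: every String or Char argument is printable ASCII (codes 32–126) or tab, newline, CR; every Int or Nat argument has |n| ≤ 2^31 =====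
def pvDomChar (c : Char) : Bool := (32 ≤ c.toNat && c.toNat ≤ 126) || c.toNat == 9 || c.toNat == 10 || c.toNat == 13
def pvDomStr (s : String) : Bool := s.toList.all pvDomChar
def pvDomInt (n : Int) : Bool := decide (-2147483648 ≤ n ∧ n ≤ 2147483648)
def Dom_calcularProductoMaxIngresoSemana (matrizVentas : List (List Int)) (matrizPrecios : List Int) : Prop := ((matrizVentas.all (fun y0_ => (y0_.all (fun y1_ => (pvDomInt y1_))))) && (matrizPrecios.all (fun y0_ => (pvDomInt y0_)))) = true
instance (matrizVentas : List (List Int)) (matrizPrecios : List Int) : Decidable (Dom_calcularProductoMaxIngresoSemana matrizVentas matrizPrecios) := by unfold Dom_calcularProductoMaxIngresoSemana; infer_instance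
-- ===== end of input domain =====

-- B replaces A's build-list-then-max-then-index decomposition by a single fused pass keeping a
-- running best revenue and best 1-based index (strict '>' preserves max()'s first-occurrence tie rule).


-- ===== PORT A =====
-- literal transliteration; the pyGetD/getD defaults are only reached outside Pre_ (where Python A raises)
def calcularProductoMaxIngresoSemana (matrizVentas : List (List Int)) (matrizPrecios : List Int) : Int :=
  let filas := matrizVentas.length
  let listaTotalVentas :=
    (PySem.List.pyRange 0 (filas : Int) 1).map
      (fun f => (PySem.List.pyGetD matrizVentas f []).sum * PySem.List.pyGetD matrizPrecios f 0)
  let maxVentas := (PySem.List.max? listaTotalVentas (fun y => y)).getD 0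
  let productoMaxVentas := ((PySem.List.index? listaTotalVentas maxVentas).getD 0 : Int) + 1
  productoMaxVentas

-- ===== PORT B =====
-- ingreso of the row at pair p = (f, fila):  sum(fila) * matrizPrecios[f]
def pvVal (matrizPrecios : List Int) (p : Int × List Int) : Int :=
  p.2.sum * PySem.List.pyGetD matrizPrecios p.1 0
-- one loop iteration on the state (best, mejorProducto), given q = (f, ingreso)
def pvStep (st : Option Int × Int) (q : Int × Int) : Option Int × Int :=
  match st.1 with
  | none => (some q.2, q.1 + 1)
  | some b => if b < q.2 then (some q.2, q.1 + 1) else st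

def calcularProductoMaxIngresoSemana_alt (matrizVentas : List (List Int)) (matrizPrecios : List Int) : Int :=
  ((PySem.List.enumerate matrizVentas 0).foldl
      (fun st p => pvStep st (p.1, pvVal matrizPrecios p)) (none, 0)).2

-- ===== PRECONDITION & SPEC =====
-- Pre_ excludes exactly the inputs where Python A raises: empty matrizVentas (max() of an empty
-- sequence, ValueError — B raises ValueError there too) and matrizPrecios shorter than
-- matrizVentas (IndexError in both).
def Pre_calcularProductoMaxIngresoSemana (matrizVentas : List (List Int)) (matrizPrecios : List Int) : Prop :=
  matrizVentas ≠ [] ∧ matrizVentas.length ≤ matrizPrecios.length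
instance (matrizVentas : List (List Int)) (matrizPrecios : List Int) : Decidable (Pre_calcularProductoMaxIngresoSemana matrizVentas matrizPrecios) := by unfold Pre_calcularProductoMaxIngresoSemana; infer_instance

def pvWitness_calcularProductoMaxIngresoSemana : List (List Int) × List Int := ([[1, 2], [3]], [5, 4])

def Spec_calcularProductoMaxIngresoSemana (matrizVentas : List (List Int)) (matrizPrecios : List Int) (out : Int) : Prop := out = calcularProductoMaxIngresoSemana_alt matrizVentas matrizPrecios
instance (matrizVentas : List (List Int)) (matrizPrecios : List Int) (out : Int) : Decidable (Spec_calcularProductoMaxIngresoSemana matrizVentas matrizPrecios out) := by unfold Spec_calcularProductoMaxIngresoSemana; infer_instance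

-- ===== CLAIM (what is proved, stated in full; the proofs are below) =====
def Claim_equal_calcularProductoMaxIngresoSemana : Prop := ∀ (matrizVentas : List (List Int)) (matrizPrecios : List Int), Dom_calcularProductoMaxIngresoSemana matrizVentas matrizPrecios → Pre_calcularProductoMaxIngresoSemana matrizVentas matrizPrecios → Spec_calcularProductoMaxIngresoSemana matrizVentas matrizPrecios (calcularProductoMaxIngresoSemana matrizVentas matrizPrecios)

-- ===== LEMMAS AND PROOFS =====

lemma enum_getElem {α : Type} (xs : List α) (s : Int) (i : Nat) (h : i < xs.length) :
    (PySem.List.enumerate xs s)[i]'(by simpa [PySem.List.length_enumerate] using h)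
      = (s + i, xs[i]) := by
  induction xs generalizing s i with
  | nil => simp at h
  | cons x t ih =>
    cases i with
    | zero => simp [PySem.List.enumerate_cons]
    | succ j =>
      simp only [PySem.List.enumerate_cons, List.getElem_cons_succ]
      rw [ih (s + 1) j (by simpa using h)]
      simp; ring_nf

-- A's intermediate list listaTotalVentas equals the list of ingresos B computes row by row
lemma lista_eq (mv : List (List Int)) (mp : List Int) :
    (PySem.List.pyRange 0 (mv.length : Int) 1).map
        (fun f => (PySem.List.pyGetD mv f []).sum * PySem.List.pyGetD mp f 0)
      = (PySem.List.enumerate mv 0).map (fun p => pvVal mp p) := by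
  apply List.ext_getElem
  · simp [PySem.List.length_pyRange_one, PySem.List.length_enumerate]
  · intro i h1 h2
    have hi : i < mv.length := by
      simpa [PySem.List.length_pyRange_one] using h1
    rw [List.getElem_map, List.getElem_map, PySem.List.getElem_pyRange_one,
        enum_getElem mv 0 i hi]
    simp [pvVal, PySem.List.pyGetD_natCast, hi]

-- mapping (f, fila) ↦ (f, ingreso) turns enumerate of rows into enumerate of ingresos
lemma enum_map_val (mp : List Int) (mv : List (List Int)) (s : Int) :
    (PySem.List.enumerate mv s).map (fun p => (p.1, pvVal mp p))
      = PySem.List.enumerate ((PySem.List.enumerate mv s).map (fun p => pvVal mp p)) s := by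
  induction mv generalizing s with
  | nil => simp [PySem.List.enumerate_nil]
  | cons x t ih => simp [PySem.List.enumerate_cons, ih]

lemma max?_snoc (P : List Int) (x mP : Int)
    (hm : PySem.List.max? P (fun y => y) = some mP) :
    PySem.List.max? (P ++ [x]) (fun y => y) = some (max mP x) := by
  cases P with
  | nil =>
    rw [(PySem.List.max?_eq_none_iff [] (fun y => y)).mpr rfl] at hm
    simp at hm
  | cons p t =>
    rw [PySem.List.max?_id_cons] at hm
    rw [List.cons_append, PySem.List.max?_id_cons, List.foldl_append]
    simp only [List.foldl_cons, List.foldl_nil]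
    injection hm with hm
    rw [hm]

-- running-argmax loop invariant: from the max / first-index data of the prefix P, B's loop over
-- the remaining ingresos T produces the max / first-index data of P ++ T (A's answer shape)
lemma key_loop : ∀ (T P : List Int) (mP : Int) (k : Nat),
    PySem.List.max? P (fun y => y) = some mP →
    PySem.List.index? P mP = some k →
    (PySem.List.enumerate T (P.length : Int)).foldl pvStep (some mP, (k : Int) + 1)
      = (PySem.List.max? (P ++ T) (fun y => y),
         ((PySem.List.index? (P ++ T) ((PySem.List.max? (P ++ T) (fun y => y)).getD 0)).getD 0 : Int) + 1) := by
  intro T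
  induction T with
  | nil =>
    intro P mP k hm hi
    have hi' := hi
    rw [PySem.List.index?_eq_idxOf?] at hi'
    simp [PySem.List.enumerate_nil, hm, hi']
  | cons x T ih =>
    intro P mP k hm hi
    rw [PySem.List.enumerate_cons]
    simp only [List.foldl_cons]
    have hmax := max?_snoc P x mP hm
    have hassoc : P ++ x :: T = (P ++ [x]) ++ T := by simp
    by_cases hlt : mP < x
    · have hx : x ∉ P := fun hmem => absurd (PySem.List.max?_isMax hm x hmem) (by simp; omega)
      have hstep : pvStep (some mP, (k : Int) + 1) ((P.length : Int), x)
          = (some x, (P.length : Int) + 1) := by simp [pvStep, hlt]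
      rw [hstep]
      have hmax' : PySem.List.max? (P ++ [x]) (fun y => y) = some x := by
        rw [hmax, max_eq_right (le_of_lt hlt)]
      have := ih (P ++ [x]) x P.length hmax' (PySem.List.index?_append_singleton_self P x hx)
      rw [hassoc]
      simpa using this
    · have hstep : pvStep (some mP, (k : Int) + 1) ((P.length : Int), x)
          = (some mP, (k : Int) + 1) := by simp [pvStep, hlt]
      rw [hstep]
      have hmax' : PySem.List.max? (P ++ [x]) (fun y => y) = some mP := by
        rw [hmax, max_eq_left (by omega)]
      have hmem : mP ∈ P := PySem.List.max?_mem hm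
      have hi' : PySem.List.index? (P ++ [x]) mP = some k := by
        rw [PySem.List.index?_append_of_mem _ hmem, hi]
      have := ih (P ++ [x]) mP k hmax' hi'
      rw [hassoc]
      simpa using this

-- ===== VERDICT (by name: the statement is the Claim_ definition above) =====
theorem calcularProductoMaxIngresoSemana_spec : Claim_equal_calcularProductoMaxIngresoSemana := by
  intro mv mp _ hpre
  obtain ⟨hne, -⟩ := hpre
  unfold Spec_calcularProductoMaxIngresoSemana
  obtain ⟨v, rest, rfl⟩ := List.exists_cons_of_ne_nil hne
  simp only [calcularProductoMaxIngresoSemana, calcularProductoMaxIngresoSemana_alt]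
  rw [lista_eq]
  rw [PySem.List.enumerate_cons, List.foldl_cons]
  have h1 : pvStep (none, 0) (((0:Int), v).1, pvVal mp ((0:Int), v))
      = (some (pvVal mp (0, v)), (0:Int) + 1) := rfl
  rw [h1]
  have h2 : (PySem.List.enumerate rest (0 + 1)).foldl
        (fun st p => pvStep st (p.1, pvVal mp p)) (some (pvVal mp (0, v)), (0:Int) + 1)
      = ((PySem.List.enumerate rest (0 + 1)).map (fun p => (p.1, pvVal mp p))).foldl
          pvStep (some (pvVal mp (0, v)), (0:Int) + 1) := by
    rw [List.foldl_map]
  rw [h2, enum_map_val]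
  have hmax : PySem.List.max? [pvVal mp (0, v)] (fun y => y) = some (pvVal mp (0, v)) := by
    rw [PySem.List.max?_id_cons]; rfl
  have hidx : PySem.List.index? [pvVal mp (0, v)] (pvVal mp (0, v)) = some 0 :=
    PySem.List.index?_cons_self _ _
  have hk := key_loop ((PySem.List.enumerate rest (0+1)).map (fun p => pvVal mp p))
      [pvVal mp (0, v)] (pvVal mp (0, v)) 0 hmax hidx
  simp only [List.length_cons, List.length_nil, Nat.cast_zero] at hk
  norm_num at hk ⊢
  rw [hk]
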